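-- pv_equiv track=rewrite | github.com/Faye-yufan/coding-challenge | arrayGenerator.py | arrayGenerator
-- ===== SOURCE A (Python) =====
-- def arrayGenerator(arr, l, r):
--     brr, cur = [], 0
--     diff = 0
--
--     for num in arr:
--         cur = max(l, num) + diff
--         if cur > r:
--             return [-1]
--         brr.append(cur)
--         diff += 1
--     return brr
-- ===== SOURCE B (Python) =====
-- def arrayGenerator(arr, l, r):
--     if not arr:
--         return []
--     peak = max(num + i for i, num in enumerate(arr))
--     if max(peak, l + len(arr) - 1) > r:
--         return [-1]
--     return [max(l, num) + i for i, num in enumerate(arr)]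
-- ===== Notes on version B (the rewrite author's own statement) =====
-- stated objective: alternative
-- what changed: Replaces A's interleaved accumulate-check-early-exit loop with a three-stage algorithm based on the identity max_i(max(l,a_i)+i) = max(max_i(a_i+i), l+n-1): first compute the single peak value max(a_i+i), then decide validity by one comparison max(peak, l+n-1) > r (the l-branch collapses to a closed form), and only then build the output list.
import Mathlib
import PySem

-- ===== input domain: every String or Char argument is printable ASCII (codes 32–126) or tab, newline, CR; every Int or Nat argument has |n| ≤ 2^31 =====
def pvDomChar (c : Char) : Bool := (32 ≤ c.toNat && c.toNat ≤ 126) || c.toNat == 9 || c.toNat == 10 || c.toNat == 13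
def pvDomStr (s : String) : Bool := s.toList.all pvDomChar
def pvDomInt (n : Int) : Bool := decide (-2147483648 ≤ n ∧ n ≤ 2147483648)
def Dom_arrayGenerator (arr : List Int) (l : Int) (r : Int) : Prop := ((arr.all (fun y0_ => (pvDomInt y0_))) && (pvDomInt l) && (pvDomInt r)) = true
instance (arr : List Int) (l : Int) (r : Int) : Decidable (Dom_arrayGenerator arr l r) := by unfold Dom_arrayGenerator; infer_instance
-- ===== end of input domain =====

-- B replaces A's accumulate-check-early-exit loop with: compute the peak max(a_i+i),
-- decide validity by the single comparison max(peak, l+n-1) > r, then build the list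
-- (using the identity max_i(max(l,a_i)+i) = max(max_i(a_i+i), l+n-1)). Objective: alternative.

-- ===== PORT A =====
-- literal port of A's loop: state (diff, brr), early return [-1] when cur > r
def arrayGeneratorLoop (l r : Int) : List Int → Int → List Int → List Int
  | [], _, brr => brr
  | num :: rest, diff, brr =>
    let cur := max l num + diff
    if cur > r then [-1] else arrayGeneratorLoop l r rest (diff + 1) (brr ++ [cur])

def arrayGenerator (arr : List Int) (l : Int) (r : Int) : List Int :=
  arrayGeneratorLoop l r arr 0 []

-- ===== PORT B =====
-- Python max over a nonempty sequence = fold of max over first element (the [] branch is unreachable, guarded by the emptiness test)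
def arrayGenerator_alt (arr : List Int) (l : Int) (r : Int) : List Int :=
  if arr.isEmpty then []
  else
    let vals := (PySem.List.enumerate arr).map (fun p => p.2 + p.1)
    let peak := match vals with | [] => 0 | v :: vs => vs.foldl max v
    if max peak (l + (arr.length : Int) - 1) > r then [-1]
    else (PySem.List.enumerate arr).map (fun p => max l p.2 + p.1)

-- ===== PRECONDITION & SPEC =====
def Spec_arrayGenerator (arr : List Int) (l : Int) (r : Int) (out : List Int) : Prop := out = arrayGenerator_alt arr l r
instance (arr : List Int) (l : Int) (r : Int) (out : List Int) : Decidable (Spec_arrayGenerator arr l r out) := by unfold Spec_arrayGenerator; infer_instance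

-- ===== CLAIM (what is proved, stated in full; the proofs are below) =====
def Claim_equal_arrayGenerator : Prop := ∀ (arr : List Int) (l : Int) (r : Int), Dom_arrayGenerator arr l r → Spec_arrayGenerator arr l r (arrayGenerator arr l r)

-- ===== LEMMAS AND PROOFS =====

-- A's loop equals: map over enumerate (started at diff), guarded by one any-test over that map, prefixed by brr.
theorem arrayGeneratorLoop_eq (l r : Int) (arr : List Int) :
    ∀ (diff : Int) (brr : List Int),
      arrayGeneratorLoop l r arr diff brr =
        (if ((PySem.List.enumerate arr diff).map (fun p => max l p.2 + p.1)).any (fun x => x > r)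
         then [-1]
         else brr ++ (PySem.List.enumerate arr diff).map (fun p => max l p.2 + p.1)) := by
  induction arr with
  | nil => intro diff brr; simp [arrayGeneratorLoop, PySem.List.enumerate_nil]
  | cons num rest ih =>
    intro diff brr
    simp only [arrayGeneratorLoop, PySem.List.enumerate_cons, List.map_cons, List.any_cons]
    by_cases h : max l num + diff > r
    · simp [h]
    · have h' : decide (max l num + diff > r) = false := by simpa using h
      simp only [h', Bool.false_or, if_neg h]
      rw [ih (diff + 1) (brr ++ [max l num + diff])]
      split_ifs with h2
      · rfl
      · simp

-- the fold of max exceeds r iff the seed or some folded element does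
theorem foldl_max_gt (r : Int) (vs : List Int) : ∀ (v : Int),
    (r < vs.foldl max v ↔ r < v ∨ ∃ x ∈ vs, r < x) := by
  induction vs with
  | nil => intro v; simp
  | cons x xs ih =>
    intro v
    rw [List.foldl_cons, ih (max v x)]
    simp only [List.mem_cons, lt_max_iff]
    constructor
    · rintro (h | ⟨y, hy, hyr⟩)
      · tauto
      · exact Or.inr ⟨y, Or.inr hy, hyr⟩
    · rintro (h | ⟨y, (rfl | hy), hyr⟩)
      · tauto
      · tauto
      · exact Or.inr ⟨y, hy, hyr⟩

-- max l v + i > r splits into the two branches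
theorem max_add_gt (l v i r : Int) : (r < max l v + i) ↔ (r < v + i ∨ r < l + i) := by
  constructor <;> intro h
  · rcases max_cases l v with ⟨e, h2⟩ | ⟨e, h2⟩ <;> rw [e] at h <;> omega
  · rcases max_cases l v with ⟨e, h2⟩ | ⟨e, h2⟩ <;> rcases h with h | h <;> rw [e] <;> omega

theorem arrayGenerator_spec : Claim_equal_arrayGenerator := by
  intro arr l r _
  unfold Spec_arrayGenerator arrayGenerator arrayGenerator_alt
  rw [arrayGeneratorLoop_eq]
  cases arr with
  | nil => simp [PySem.List.enumerate_nil]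
  | cons a rest =>
    simp only [PySem.List.enumerate_cons, List.map_cons, List.isEmpty_cons,
      Bool.false_eq_true, if_false, List.nil_append, List.length_cons,
      Nat.cast_add, Nat.cast_one]
    have key :
        ((((max l a + 0) :: (PySem.List.enumerate rest (0 + 1)).map (fun p => max l p.2 + p.1)).any
            (fun x => x > r)) = true) ↔
        max (((PySem.List.enumerate rest (0 + 1)).map (fun p => p.2 + p.1)).foldl max (a + 0))
            (l + ((rest.length : Int) + 1) - 1) > r := by
      rw [gt_iff_lt, lt_max_iff, foldl_max_gt]
      simp only [List.any_eq_true, List.mem_cons, List.mem_map,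
        PySem.List.mem_enumerate_iff, gt_iff_lt, decide_eq_true_eq]
      constructor
      · rintro ⟨x, (rfl | ⟨p, ⟨k, hk, rfl⟩, rfl⟩), hxr⟩
        · rw [max_add_gt] at hxr
          have hn : (0 : Int) ≤ (rest.length : Int) := by positivity
          rcases hxr with h | h
          · exact Or.inl (Or.inl h)
          · exact Or.inr (by omega)
        · simp only at hxr
          rw [max_add_gt] at hxr
          have hk' : (k : Int) < (rest.length : Int) := by exact_mod_cast hk
          rcases hxr with h | h
          · refine Or.inl (Or.inr ⟨rest[k] + (0 + 1 + k), ⟨(0 + 1 + (k : Int), rest[k]), ⟨k, hk, rfl⟩, rfl⟩, ?_⟩)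
            omega
          · exact Or.inr (by omega)
      · rintro ((h | ⟨x, ⟨p, ⟨k, hk, rfl⟩, rfl⟩, hxr⟩) | h)
        · refine ⟨max l a + 0, Or.inl rfl, ?_⟩
          rw [max_add_gt]; exact Or.inl h
        · refine ⟨max l rest[k] + (0 + 1 + k), Or.inr ⟨(0 + 1 + (k : Int), rest[k]), ⟨k, hk, rfl⟩, rfl⟩, ?_⟩
          simp only at hxr ⊢
          rw [max_add_gt]
          have hk' : (k : Int) < (rest.length : Int) := by exact_mod_cast hk
          exact Or.inl (by omega)
        · rcases List.eq_nil_or_concat rest with rfl | ⟨ys, y, rfl⟩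
          · refine ⟨max l a + 0, Or.inl rfl, ?_⟩
            rw [max_add_gt]
            simp only [List.length_nil, Nat.cast_zero] at h
            exact Or.inr (by omega)
          · simp only [List.concat_eq_append] at h ⊢
            have hlen : ((ys ++ [y]).length : Int) = (ys.length : Int) + 1 := by
              simp [List.length_append]
            rw [hlen] at h
            refine ⟨max l y + (0 + 1 + (ys.length : Int)),
              Or.inr ⟨(0 + 1 + (ys.length : Int), y), ⟨ys.length, by simp, by simp⟩, rfl⟩, ?_⟩
            rw [max_add_gt]
            exact Or.inr (by omega)
    by_cases hB :
        max (((PySem.List.enumerate rest (0 + 1)).map (fun p => p.2 + p.1)).foldl max (a + 0))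
            (l + ((rest.length : Int) + 1) - 1) > r
    · rw [if_pos (key.mpr hB), if_pos hB]
    · rw [if_neg (fun h => hB (key.mp h)), if_neg hB]
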